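-- pv_equiv track=rewrite | github.com/Serial-Studio/Serial-Studio | scripts/code-verify.py | apply_brace_free_fixes
-- ===== SOURCE A (Python) =====
-- def apply_brace_free_fixes(lines: list[str], insert_after: list[int]) -> list[str]:
--     """Return a new list of lines with a blank line inserted after each
--     index in `insert_after`."""
--     if not insert_after:
--         return lines
--
--     inserts = set(insert_after)
--     out: list[str] = []
--     for i, line in enumerate(lines):
--         out.append(line)
--         if i in inserts:
--             out.append("")
--     return out
-- ===== SOURCE B (Python) =====
-- def apply_brace_free_fixes(lines: list[str], insert_after: list[int]) -> list[str]:
--     """Return a new list of lines with a blank line inserted after each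
--     index in `insert_after`."""
--     if not insert_after:
--         return lines
--     out = list(lines)
--     for c in sorted({i for i in insert_after if 0 <= i < len(lines)}, reverse=True):
--         out.insert(c + 1, "")
--     return out
-- ===== Notes on version B (the rewrite author's own statement) =====
-- stated objective: alternative
-- what changed: Instead of scanning every line and testing its index against a set, B copies the list once and inserts a blank line at position c+1 for each distinct valid cut index, processed in descending order so earlier positions are unaffected.
import Mathlib
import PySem

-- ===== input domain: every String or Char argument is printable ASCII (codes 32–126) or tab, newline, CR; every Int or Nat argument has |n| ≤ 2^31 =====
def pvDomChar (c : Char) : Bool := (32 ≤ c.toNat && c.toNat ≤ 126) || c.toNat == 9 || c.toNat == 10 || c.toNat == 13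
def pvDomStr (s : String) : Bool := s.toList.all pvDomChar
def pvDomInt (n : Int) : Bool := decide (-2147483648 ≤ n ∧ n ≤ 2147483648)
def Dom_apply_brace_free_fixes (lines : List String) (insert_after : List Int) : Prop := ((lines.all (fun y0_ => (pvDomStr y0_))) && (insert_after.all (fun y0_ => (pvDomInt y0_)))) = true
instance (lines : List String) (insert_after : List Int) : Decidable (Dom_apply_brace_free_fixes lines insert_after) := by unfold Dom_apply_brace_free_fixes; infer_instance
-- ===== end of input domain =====

-- B replaces A's per-line membership scan by copying the list and inserting "" at each
-- valid cut position in descending order (alternative decomposition, same cost class).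

-- ===== PORT A =====
def apply_brace_free_fixes (lines : List String) (insert_after : List Int) : List String :=
  if insert_after = [] then lines
  else
    let inserts : PySem.Set Int := PySem.Set.ofList insert_after
    (PySem.List.enumerate lines).foldl
      (fun out p =>
        let out := out ++ [p.2]
        if PySem.Set.contains inserts p.1 then out ++ [""] else out) []

-- ===== PORT B =====
def apply_brace_free_fixes_alt (lines : List String) (insert_after : List Int) : List String :=
  if insert_after = [] then lines
  else
    let cuts : List Int :=
      PySem.List.sorted
        (PySem.Set.ofList (insert_after.filter
          (fun i => decide (0 ≤ i) && decide (i < (lines.length : Int)))))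
        (fun x => x) true
    cuts.foldl (fun out c => PySem.List.insert out (c + 1) "") lines

-- ===== PRECONDITION & SPEC =====
def Spec_apply_brace_free_fixes (lines : List String) (insert_after : List Int) (out : List String) : Prop := out = apply_brace_free_fixes_alt lines insert_after
instance (lines : List String) (insert_after : List Int) (out : List String) : Decidable (Spec_apply_brace_free_fixes lines insert_after out) := by unfold Spec_apply_brace_free_fixes; infer_instance

-- ===== CLAIM (what is proved, stated in full; the proofs are below) =====
def Claim_equal_apply_brace_free_fixes : Prop := ∀ (lines : List String) (insert_after : List Int), Dom_apply_brace_free_fixes lines insert_after → Spec_apply_brace_free_fixes lines insert_after (apply_brace_free_fixes lines insert_after)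

-- ===== LEMMAS AND PROOFS =====

/-- Canonical form: each line, followed by a blank iff its index satisfies `P`. -/
def canonP (P : Int → Bool) (s : Int) : List String → List String
  | [] => []
  | l :: t => l :: ((if P s then [""] else []) ++ canonP P (s + 1) t)

theorem canonP_congr (P Q : Int → Bool) (s : Int) (lines : List String)
    (h : ∀ i, s ≤ i → i < s + lines.length → P i = Q i) :
    canonP P s lines = canonP Q s lines := by
  induction lines generalizing s with
  | nil => rfl
  | cons l t ih =>
    simp only [canonP]
    rw [h s le_rfl (by simp), ih (s + 1) (fun i h1 h2 => h i (by omega) (by simp at h2 ⊢; omega))]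

theorem canonP_false (P : Int → Bool) (s : Int) (lines : List String)
    (h : ∀ i, s ≤ i → P i = false) : canonP P s lines = lines := by
  induction lines generalizing s with
  | nil => rfl
  | cons l t ih =>
    simp only [canonP, h s le_rfl, if_neg Bool.false_ne_true]
    simp [ih (s + 1) (fun i hi => h i (by omega))]

/-- A's loop computes the canonical form. -/
theorem A_loop (lines : List String) (s : Int) (P : Int → Bool) (acc : List String) :
    (PySem.List.enumerate lines s).foldl
      (fun out p =>
        let out := out ++ [p.2]
        if P p.1 then out ++ [""] else out) acc
    = acc ++ canonP P s lines := by
  induction lines generalizing s acc with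
  | nil => simp [PySem.List.enumerate_nil, canonP]
  | cons l t ih =>
    rw [PySem.List.enumerate_cons]
    simp only [List.foldl_cons, canonP]
    rw [ih]
    split <;> simp

/-- Inserting a blank after relative position `k` extends the canonical form,
    provided all of `P`'s hits lie strictly below `s + k`. -/
theorem canonP_insert (lines : List String) (k : Nat) (s : Int) (P : Int → Bool)
    (hk : k < lines.length) (hP : ∀ i, P i = true → i < s + k) :
    canonP P s (lines.take (k + 1) ++ "" :: lines.drop (k + 1))
      = canonP (fun i => P i || i == s + k) s lines := by
  induction lines generalizing s k with
  | nil => simp at hk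
  | cons l t ih =>
    cases k with
    | zero =>
      simp only [Nat.cast_zero, add_zero]
      have hPs : P s = false := by
        by_contra h
        have := hP s (by simpa using h)
        push_cast at this; omega
      have h1 : canonP P (s + 1 + 1) t = t := by
        apply canonP_false
        intro i hi
        by_contra h
        have := hP i (by simpa using h); push_cast at this; omega
      have h2 : canonP (fun i => P i || i == s) (s + 1) t = t := by
        apply canonP_false
        intro i hi
        have hPi : P i = false := by
          by_contra h
          have := hP i (by simpa using h); push_cast at this; omega
        simp [hPi]; omega
      have hPs1 : P (s + 1) = false := by
        by_contra h
        have := hP (s + 1) (by simpa using h); push_cast at this; omega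
      simp [canonP, hPs, hPs1, h1, h2]
    | succ k =>
      simp only [List.take_succ_cons, List.drop_succ_cons, List.cons_append, canonP]
      have hs : (s == s + ((k + 1 : Nat) : Int)) = false := by
        simp; omega
      simp only [hs, Bool.or_false]
      rw [ih k (s + 1) (by simp only [List.length_cons] at hk; omega)
        (fun i hi => by have := hP i hi; push_cast at this ⊢; omega)]
      congr 2
      apply canonP_congr
      intro i _ _
      congr 2
      push_cast
      omega

/-- B's loop: inserting at valid cuts in strictly descending order yields the canonical form. -/
theorem B_loop (cuts : List Int) (lines : List String)
    (hpw : cuts.Pairwise (fun a b => b < a))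
    (hv : ∀ c ∈ cuts, 0 ≤ c ∧ c < (lines.length : Int)) :
    cuts.foldl (fun out c => PySem.List.insert out (c + 1) "") lines
      = canonP (fun i => decide (i ∈ cuts)) 0 lines := by
  induction cuts generalizing lines with
  | nil => rw [canonP_false] <;> simp
  | cons c cs ih =>
    obtain ⟨hc0, hclen⟩ := hv c (by simp)
    obtain ⟨k, rfl⟩ : ∃ k : Nat, c = (k : Int) := ⟨c.toNat, by omega⟩
    have hklen : k < lines.length := by exact_mod_cast hclen
    have hins : PySem.List.insert lines ((k : Int) + 1) "" =
        lines.take (k + 1) ++ "" :: lines.drop (k + 1) := by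
      have := PySem.List.insert_natCast lines (k + 1) "" (by omega)
      push_cast at this ⊢
      exact this
    simp only [List.foldl_cons, hins]
    rw [ih (lines.take (k + 1) ++ "" :: lines.drop (k + 1)) hpw.of_cons
      (fun c' hc' => by
        obtain ⟨h0, hl⟩ := hv c' (by simp [hc'])
        have := (List.pairwise_cons.1 hpw).1 c' hc'
        constructor
        · exact h0
        · simp
          omega)]
    rw [canonP_insert lines k 0 _ hklen (fun i hi => by
      simp only [decide_eq_true_eq] at hi
      have := (List.pairwise_cons.1 hpw).1 i hi
      omega)]
    apply canonP_congr
    intro i _ _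
    simp only [List.mem_cons]
    by_cases h : i ∈ cs <;> by_cases h2 : i = (k : Int) <;> simp [h, h2]

-- ===== VERDICT (by name: the statement is the Claim_ definition above) =====
theorem apply_brace_free_fixes_spec : Claim_equal_apply_brace_free_fixes := by
  intro lines insert_after _
  unfold Spec_apply_brace_free_fixes apply_brace_free_fixes apply_brace_free_fixes_alt
  by_cases hne : insert_after = []
  · simp [hne]
  · simp only [if_neg hne]
    set cuts : List Int :=
      PySem.List.sorted
        (PySem.Set.ofList (insert_after.filter
          (fun i => decide (0 ≤ i) && decide (i < (lines.length : Int)))))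
        (fun x => x) true with hcuts
    have hnodup : cuts.Nodup :=
      (PySem.List.sorted_perm _ _ _).nodup_iff.2 (PySem.Set.nodup_ofList _)
    have hge : cuts.Pairwise (fun a b => b ≤ a) := PySem.List.sorted_pairwise_rev _ _
    have hpw : cuts.Pairwise (fun a b => b < a) :=
      (hge.and hnodup).imp (fun h => lt_of_le_of_ne h.1 (Ne.symm h.2))
    have hmem : ∀ i : Int, i ∈ cuts ↔ (i ∈ insert_after ∧ 0 ≤ i ∧ i < (lines.length : Int)) := by
      intro i
      rw [hcuts, PySem.List.mem_sorted, PySem.Set.mem_ofList, List.mem_filter]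
      simp
    rw [A_loop, B_loop cuts lines hpw (fun c hc => ((hmem c).1 hc).2)]
    simp only [List.nil_append]
    apply canonP_congr
    intro i h0 hlen
    rw [show PySem.Set.contains (PySem.Set.ofList insert_after) i = decide (i ∈ insert_after) by
      simp [PySem.Set.contains]]
    simp only [decide_eq_decide, hmem]
    simp at hlen
    constructor
    · intro h; exact ⟨h, h0, by omega⟩
    · exact fun h => h.1
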